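-- pv_equiv track=rewrite | github.com/pypi-data/pypi-mirror-399 | packages/llb_doc/llb_doc-0.3.0.tar.gz/llb_doc-0.3.0/src/llb_doc/core/graph_document.py | _build_tiers_string
-- ===== SOURCE A (Python) =====
-- def _build_tiers_string(tiers: dict[str, int]) -> str:
--     """Build multiline tiers string like '0: N42\\n1: N10, N50'."""
--     tier_groups: dict[int, list[str]] = {}
--     for node_id, tier in tiers.items():
--         if tier not in tier_groups:
--             tier_groups[tier] = []
--         tier_groups[tier].append(node_id)
--
--     lines = []
--     for tier in sorted(tier_groups.keys()):
--         nodes = ", ".join(sorted(tier_groups[tier]))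
--         lines.append(f"{tier}: {nodes}")
--     return "\n".join(lines)
-- ===== SOURCE B (Python) =====
-- def _build_tiers_string(tiers: dict[str, int]) -> str:
--     """Build multiline tiers string like '0: N42\\n1: N10, N50'."""
--     out = []
--     prev = None
--     for node_id, tier in sorted(tiers.items(), key=lambda kv: (kv[1], kv[0])):
--         if out and tier == prev:
--             out[-1] += ", " + node_id
--         else:
--             out.append(f"{tier}: {node_id}")
--             prev = tier
--     return "\n".join(out)
-- ===== Notes on version B (the rewrite author's own statement) =====
-- stated objective: alternative
-- what changed: A builds a tier->nodes grouping dict, then sorts the keys and sorts each group separately; B does one global sort of the items by (tier, node_id) and a single linear scan that emits/extends lines as the tier changes.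
import Mathlib
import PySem

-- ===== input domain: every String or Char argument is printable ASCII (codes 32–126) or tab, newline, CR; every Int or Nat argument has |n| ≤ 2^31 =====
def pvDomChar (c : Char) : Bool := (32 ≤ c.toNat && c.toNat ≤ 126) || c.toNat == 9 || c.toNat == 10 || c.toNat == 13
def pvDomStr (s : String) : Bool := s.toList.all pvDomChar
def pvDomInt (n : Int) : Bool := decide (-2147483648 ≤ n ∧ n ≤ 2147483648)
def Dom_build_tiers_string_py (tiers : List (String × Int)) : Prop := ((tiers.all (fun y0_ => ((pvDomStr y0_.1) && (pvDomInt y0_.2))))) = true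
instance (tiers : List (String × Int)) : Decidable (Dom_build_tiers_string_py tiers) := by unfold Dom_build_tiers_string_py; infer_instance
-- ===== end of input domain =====

-- B replaces A's build-a-grouping-dict-then-sort-keys-and-each-group by one global
-- sort on (tier, node_id) followed by a single linear scan (objective: alternative).

-- ===== PORT A =====
def build_tiers_string_py (tiers : List (String × Int)) : String :=
  let tier_groups : PySem.Dict Int (List String) :=
    tiers.foldl (fun d p =>
      (if d.contains p.2 then d else d.insert p.2 []).modify p.2 [] (fun g => g ++ [p.1]))
      PySem.Dict.empty
  let lines : List String :=
    (PySem.List.sorted tier_groups.keys (fun t => t)).foldl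
      (fun acc t =>
        acc ++ [PySem.Int.toStr t ++ ": " ++
          PySem.Str.join ", " (PySem.List.sorted (tier_groups.getD t []) (fun s => s))]) []
  PySem.Str.join "\n" lines

-- ===== PORT B =====
-- one step of B's scan over the globally sorted items
def pvBStep (st : List String × Option Int) (p : String × Int) : List String × Option Int :=
  if st.1 ≠ [] ∧ st.2 = some p.2 then
    (st.1.dropLast ++ [st.1.getLast! ++ ", " ++ p.1], st.2)
  else
    (st.1 ++ [PySem.Int.toStr p.2 ++ ": " ++ p.1], some p.2)

def build_tiers_string_py_alt (tiers : List (String × Int)) : String :=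
  let st := (PySem.List.sorted2 tiers (fun kv => kv.2) (fun kv => kv.1)).foldl pvBStep ([], none)
  PySem.Str.join "\n" st.1

-- ===== PRECONDITION & SPEC =====
def Spec_build_tiers_string_py (tiers : List (String × Int)) (out : String) : Prop := out = build_tiers_string_py_alt tiers
instance (tiers : List (String × Int)) (out : String) : Decidable (Spec_build_tiers_string_py tiers out) := by unfold Spec_build_tiers_string_py; infer_instance

-- ===== CLAIM (what is proved, stated in full; the proofs are below) =====
def Claim_equal_build_tiers_string_py : Prop := ∀ (tiers : List (String × Int)), Dom_build_tiers_string_py tiers → Spec_build_tiers_string_py tiers (build_tiers_string_py tiers)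

-- ===== LEMMAS AND PROOFS =====

-- the "≤ in the (tier, node_id) lexicographic order" relation B's global sort realises
def pvRle (p q : String × Int) : Prop := p.2 < q.2 ∨ (p.2 = q.2 ∧ p.1 ≤ q.1)

theorem pvRle_antisymm (p q : String × Int) (h1 : pvRle p q) (h2 : pvRle q p) : p = q := by
  rcases p with ⟨s, t⟩; rcases q with ⟨s', t'⟩
  rcases h1 with h1 | ⟨h1, h1'⟩ <;> rcases h2 with h2 | ⟨h2, h2'⟩ <;> simp only at *
  · omega
  · omega
  · omega
  · exact Prod.ext (le_antisymm h1' h2') h1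

theorem pvRle_trans (p q r : String × Int) (h1 : pvRle p q) (h2 : pvRle q r) : pvRle p r := by
  rcases h1 with h1 | ⟨h1, h1'⟩ <;> rcases h2 with h2 | ⟨h2, h2'⟩ <;> unfold pvRle
  · left; omega
  · left; omega
  · left; omega
  · right; exact ⟨by omega, le_trans h1' h2'⟩

-- the boolean comparison sorted2 uses to insert
def pvBef (p q : String × Int) : Bool :=
  decide (p.2 < q.2) || (!decide (q.2 < p.2) && decide (p.1 < q.1))

theorem pvBef_true (p q : String × Int) (h : pvBef p q = true) : pvRle p q := by
  simp only [pvBef, Bool.or_eq_true, Bool.and_eq_true, Bool.not_eq_true',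
    decide_eq_true_eq, decide_eq_false_iff_not] at h
  rcases h with h | ⟨h1, h2⟩
  · exact Or.inl h
  · by_cases hlt : p.2 < q.2
    · exact Or.inl hlt
    · exact Or.inr ⟨by omega, le_of_lt h2⟩

theorem pvBef_false (p q : String × Int) (h : pvBef p q = false) : pvRle q p := by
  simp only [pvBef, Bool.or_eq_false_iff, Bool.and_eq_false_iff, Bool.not_eq_false',
    decide_eq_true_eq, decide_eq_false_iff_not] at h
  rcases h with ⟨h1, h2 | h2⟩
  · exact Or.inl h2
  · by_cases hgt : q.2 < p.2
    · exact Or.inl hgt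
    · exact Or.inr ⟨by omega, le_of_not_gt h2⟩

theorem pv_insertBy_pairwise (x : String × Int) (ys : List (String × Int))
    (h : ys.Pairwise pvRle) : (PySem.List.insertBy pvBef x ys).Pairwise pvRle := by
  induction ys with
  | nil => simp [PySem.List.insertBy]
  | cons y ys ih =>
    rcases List.pairwise_cons.mp h with ⟨hy, hys⟩
    by_cases hb : pvBef x y = true
    · simp only [PySem.List.insertBy, hb, if_true]
      refine List.Pairwise.cons ?_ (List.Pairwise.cons hy hys)
      intro z hz
      rcases List.mem_cons.mp hz with h | hz
      · subst h; exact pvBef_true _ _ hb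
      · exact pvRle_trans _ _ _ (pvBef_true x y hb) (hy z hz)
    · simp only [PySem.List.insertBy, hb]
      refine List.Pairwise.cons ?_ (ih hys)
      intro z hz
      rcases (PySem.List.mem_insertBy pvBef x z ys).mp hz with h | hz
      · subst h; exact pvBef_false _ _ (Bool.not_eq_true _ ▸ hb)
      · exact hy z hz

theorem pv_foldl_insertBy_pairwise (xs acc : List (String × Int))
    (h : acc.Pairwise pvRle) :
    (xs.foldl (fun acc x => PySem.List.insertBy pvBef x acc) acc).Pairwise pvRle := by
  induction xs generalizing acc with
  | nil => exact h
  | cons x xs ih => exact ih _ (pv_insertBy_pairwise x acc h)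

theorem pv_sorted2_eq_foldl (tiers : List (String × Int)) :
    PySem.List.sorted2 tiers (fun kv => kv.2) (fun kv => kv.1) =
      tiers.foldl (fun acc x => PySem.List.insertBy pvBef x acc) [] := rfl

theorem pv_sorted2_pairwise (tiers : List (String × Int)) :
    (PySem.List.sorted2 tiers (fun kv => kv.2) (fun kv => kv.1)).Pairwise pvRle := by
  rw [pv_sorted2_eq_foldl]
  exact pv_foldl_insertBy_pairwise tiers [] (by simp)

-- the sorted list of distinct tiers
def pvTs (tiers : List (String × Int)) : List Int :=
  PySem.List.sorted (PySem.Set.ofList (tiers.map (fun p => p.2))) (fun t => t)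

-- node ids of one tier, in input order
def pvIds (tiers : List (String × Int)) (t : Int) : List String :=
  (tiers.filter (fun p => p.2 == t)).map (fun p => p.1)

theorem pv_flatMap_filter_perm (ts : List Int) (l : List (String × Int))
    (hnd : ts.Nodup) (hcov : ∀ p ∈ l, p.2 ∈ ts) :
    (ts.flatMap (fun t => l.filter (fun p => p.2 == t))).Perm l := by
  induction ts generalizing l with
  | nil =>
    have : l = [] := by
      cases l with
      | nil => rfl
      | cons p l => exact absurd (hcov p (by simp)) (by simp)
    simp [this]
  | cons t ts ih =>
    rcases List.nodup_cons.mp hnd with ⟨ht, hnd'⟩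
    have hrest : ts.flatMap (fun u => l.filter (fun p => p.2 == u)) =
        ts.flatMap (fun u => (l.filter (fun p => !(p.2 == t))).filter (fun p => p.2 == u)) := by
      simp only [List.flatMap]
      congr 1
      refine List.map_congr_left (fun u hu => ?_)
      have hut : u ≠ t := fun hh => ht (hh ▸ hu)
      rw [List.filter_filter]
      refine (List.filter_congr (fun p _ => ?_)).symm
      by_cases hp : p.2 = u
      · have hpt : ¬ (p.2 = t) := fun hh => hut (by omega)
        simp [hp, hut]
      · simp [hp]
    have hcov' : ∀ p ∈ l.filter (fun p => !(p.2 == t)), p.2 ∈ ts := by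
      intro p hp
      rcases List.mem_filter.mp hp with ⟨hpl, hpt⟩
      rcases List.mem_cons.mp (hcov p hpl) with h | h
      · simp only [Bool.not_eq_true', beq_eq_false_iff_ne] at hpt
        exact absurd h hpt
      · exact h
    rw [List.flatMap_cons, hrest]
    exact (((ih _ hnd' hcov').append_left _).trans (List.filter_append_perm _ l))

theorem pv_ids_map_eq_filter (tiers : List (String × Int)) (t : Int) :
    (pvIds tiers t).map (fun s => (s, t)) = tiers.filter (fun p => p.2 == t) := by
  unfold pvIds
  rw [List.map_map]
  conv_rhs => rw [← List.map_id (tiers.filter (fun p => p.2 == t))]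
  refine List.map_congr_left (fun p hp => ?_)
  rcases List.mem_filter.mp hp with ⟨_, hpt⟩
  simp only [beq_iff_eq] at hpt
  simp [Function.comp, ← hpt]

theorem pv_ts_pairwise (tiers : List (String × Int)) :
    (pvTs tiers).Pairwise (· < ·) :=
  PySem.List.sorted_ofList_pairwise_lt _

theorem pv_mem_ts (tiers : List (String × Int)) (p : String × Int) (hp : p ∈ tiers) :
    p.2 ∈ pvTs tiers := by
  unfold pvTs
  rw [PySem.List.mem_sorted, PySem.Set.mem_ofList]
  exact List.mem_map_of_mem hp

-- the canonical block decomposition of B's globally sorted list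
theorem pv_sorted2_eq_blocks (tiers : List (String × Int)) :
    PySem.List.sorted2 tiers (fun kv => kv.2) (fun kv => kv.1) =
      (pvTs tiers).flatMap
        (fun t => (PySem.List.sorted (pvIds tiers t) (fun s => s)).map (fun s => (s, t))) := by
  have hperm : ((pvTs tiers).flatMap
      (fun t => (PySem.List.sorted (pvIds tiers t) (fun s => s)).map (fun s => (s, t)))).Perm tiers := by
    refine List.Perm.trans ?_
      (pv_flatMap_filter_perm (pvTs tiers) tiers
        ((pv_ts_pairwise tiers).imp (fun hl => by intro he; subst he; exact lt_irrefl _ hl)) (fun p hp => pv_mem_ts tiers p hp))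
    refine List.Perm.flatMap_left _ (fun t _ => ?_)
    rw [← pv_ids_map_eq_filter tiers t]
    exact ((PySem.List.sorted_perm (pvIds tiers t) (fun s => s) false).map _)
  have hpw : ((pvTs tiers).flatMap
      (fun t => (PySem.List.sorted (pvIds tiers t) (fun s => s)).map (fun s => (s, t)))).Pairwise pvRle := by
    rw [List.pairwise_flatMap]
    constructor
    · intro t _
      rw [List.pairwise_map]
      refine (PySem.List.sorted_pairwise (pvIds tiers t) (fun s => s)).imp ?_
      intro a b hab
      exact Or.inr ⟨rfl, hab⟩
    · refine (pv_ts_pairwise tiers).imp ?_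
      intro t u htu x hx y hy
      rcases List.mem_map.mp hx with ⟨s, _, rfl⟩
      rcases List.mem_map.mp hy with ⟨s', _, rfl⟩
      exact Or.inl htu
  exact List.eq_of_perm_of_sorted (fun a b _ _ => pvRle_antisymm a b)
    (pv_sorted2_pairwise tiers) hpw
    ((PySem.List.sorted2_perm tiers (fun kv => kv.2) (fun kv => kv.1) false).trans hperm.symm)

-- ", ".join of a nonempty list is B's running concatenation
theorem pv_join_foldl (sep : String) (cs : List String) (c : String) :
    PySem.Str.join sep (c :: cs) = cs.foldl (fun a s => a ++ sep ++ s) c := by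
  induction cs generalizing c with
  | nil =>
    apply String.toList_inj.mp
    rw [PySem.Str.toList_join]
    simp [PySem.Chars.join_singleton]
  | cons c' cs ih =>
    have hstep : PySem.Str.join sep (c :: c' :: cs) = PySem.Str.join sep ((c ++ sep ++ c') :: cs) := by
      apply String.toList_inj.mp
      rw [PySem.Str.toList_join, PySem.Str.toList_join]
      simp only [List.map_cons]
      cases cs with
      | nil =>
        simp only [List.map_nil]
        rw [PySem.Chars.join_cons_cons, PySem.Chars.join_singleton, PySem.Chars.join_singleton]
        simp [String.toList_append]
      | cons d ds =>
        simp only [List.map_cons]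
        rw [PySem.Chars.join_cons_cons, PySem.Chars.join_cons_cons, PySem.Chars.join_cons_cons]
        simp [String.toList_append, List.append_assoc]
    rw [hstep]
    exact ih (c ++ sep ++ c')

theorem pv_foldl_prefix (sep : String) (rest : List String) (pre : String) (c : String) :
    rest.foldl (fun a s => a ++ sep ++ s) (pre ++ c) =
      pre ++ rest.foldl (fun a s => a ++ sep ++ s) c := by
  induction rest generalizing c with
  | nil => rfl
  | cons s rest ih =>
    simp only [List.foldl_cons]
    rw [show pre ++ c ++ sep ++ s = pre ++ (c ++ sep ++ s) by
      rw [String.append_assoc (s₁ := pre), String.append_assoc (s₁ := pre)]]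
    exact ih (c ++ sep ++ s)

-- B's scan within one tier block: keeps appending to the last line
theorem pv_inner_scan (rest : List String) (t : Int) (out : List String) (cur : String) :
    (rest.map (fun s => (s, t))).foldl pvBStep (out ++ [cur], some t) =
      (out ++ [rest.foldl (fun a s => a ++ ", " ++ s) cur], some t) := by
  induction rest generalizing cur with
  | nil => simp
  | cons s rest ih =>
    simp only [List.map_cons, List.foldl_cons]
    have hstep : pvBStep (out ++ [cur], some t) (s, t) = (out ++ [cur ++ ", " ++ s], some t) := by
      unfold pvBStep
      rw [if_pos (by simp)]
      simp only [List.dropLast_concat, List.getLast!_eq_getLast?_getD]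
      simp
    rw [hstep]
    exact ih (cur ++ ", " ++ s)

-- the tier B's scan last opened a line for
def pvLastTier (ts : List Int) (prev : Option Int) : Option Int :=
  match ts.getLast? with
  | none => prev
  | some t => some t

-- B's scan over the whole block decomposition produces one line per tier
theorem pv_outer_scan (ts : List Int) (f : Int → List String)
    (hpw : ts.Pairwise (· < ·)) (hne : ∀ t ∈ ts, f t ≠ [])
    (out : List String) (prev : Option Int)
    (hprev : ∀ u, prev = some u → ∀ t ∈ ts, u < t) :
    (ts.flatMap (fun t => (f t).map (fun s => (s, t)))).foldl pvBStep (out, prev) =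
      (out ++ ts.map (fun t => PySem.Int.toStr t ++ ": " ++ PySem.Str.join ", " (f t)),
        pvLastTier ts prev) := by
  induction ts generalizing out prev with
  | nil => simp [pvLastTier]
  | cons t ts ih =>
    rcases List.pairwise_cons.mp hpw with ⟨hlt, hpw'⟩
    obtain ⟨s0, rest, hf⟩ := List.exists_cons_of_ne_nil (hne t (List.mem_cons_self))
    rw [List.flatMap_cons, List.foldl_append, hf, List.map_cons, List.foldl_cons]
    have hstep : pvBStep (out, prev) (s0, t) = (out ++ [PySem.Int.toStr t ++ ": " ++ s0], some t) := by
      unfold pvBStep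
      rw [if_neg]
      rintro ⟨-, h2⟩
      exact lt_irrefl t ((hprev t h2) t (List.mem_cons_self))
    rw [hstep, pv_inner_scan rest t out (PySem.Int.toStr t ++ ": " ++ s0),
      pv_foldl_prefix ", " rest (PySem.Int.toStr t ++ ": ") s0, ← pv_join_foldl ", " rest s0, ← hf]
    rw [ih hpw' (fun u hu => hne u (List.mem_cons_of_mem t hu))
      (out ++ [PySem.Int.toStr t ++ ": " ++ PySem.Str.join ", " (f t)]) (some t)
      (fun u hu => by rw [Option.some_inj] at hu; subst hu; exact hlt)]
    rw [Prod.mk.injEq]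
    refine ⟨?_, ?_⟩
    · rw [List.map_cons, List.append_assoc, List.singleton_append]
    · unfold pvLastTier
      cases ts with
      | nil => simp
      | cons c cs =>
        cases hcl : (c :: cs).getLast? with
        | none => simp [List.getLast?_eq_none_iff] at hcl
        | some v => simp [hcl]

-- ===== A-side normalisation =====

theorem pv_modify_if (d : PySem.Dict Int (List String)) (p : String × Int) :
    (if d.contains p.2 then d else d.insert p.2 []).modify p.2 [] (fun g => g ++ [p.1]) =
      d.modify p.2 [] (fun g => g ++ [p.1]) := by
  by_cases h : d.contains p.2 = true
  · rw [if_pos h]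
  · rw [if_neg (by simp [h])]
    unfold PySem.Dict.modify
    rw [PySem.Dict.getD_insert_self, PySem.Dict.insert_insert_self,
      PySem.Dict.getD_of_not_contains d [] (Bool.not_eq_true _ ▸ h)]

-- A's grouping dict, with the redundant "insert empty first" step removed
def pvGroups (tiers : List (String × Int)) : PySem.Dict Int (List String) :=
  tiers.foldl (fun d p => d.modify p.2 [] (fun g => g ++ [p.1])) PySem.Dict.empty

theorem pv_fold_eq_groups (tiers : List (String × Int)) :
    tiers.foldl (fun d p =>
        (if d.contains p.2 then d else d.insert p.2 []).modify p.2 [] (fun g => g ++ [p.1]))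
      PySem.Dict.empty = pvGroups tiers :=
  PySem.List.foldl_congr_mem _ _ _ _ (fun d p _ => pv_modify_if d p)

theorem pv_groups_keys (tiers : List (String × Int)) :
    (pvGroups tiers).keys = PySem.Set.ofList (tiers.map (fun p => p.2)) := by
  unfold pvGroups
  rw [PySem.Dict.keys_foldl_modify_key tiers (fun p => p.2) []
    (fun _ p => fun g => g ++ [p.1]) PySem.Dict.empty]
  rw [PySem.Dict.keys_empty, PySem.Set.ofList_eq_foldl]
  rfl

theorem pv_groups_getD (tiers : List (String × Int)) (t : Int) :
    (pvGroups tiers).getD t [] = pvIds tiers t := by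
  unfold pvGroups pvIds
  have hswap : tiers.foldl (fun d p => d.modify p.2 [] (fun g => g ++ [p.1])) PySem.Dict.empty =
      (tiers.map Prod.swap).foldl (fun d p => d.modify p.1 [] (fun g => g ++ [p.2]))
        PySem.Dict.empty := by
    rw [List.foldl_map]
    simp [Prod.swap]
  rw [hswap, PySem.Dict.getD_foldl_modify_append, List.filter_map]
  rw [List.map_map, PySem.Dict.getD_empty, List.nil_append]
  rfl

theorem pvA_eq (tiers : List (String × Int)) :
    build_tiers_string_py tiers =
      PySem.Str.join "\n" ((pvTs tiers).map (fun t =>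
        PySem.Int.toStr t ++ ": " ++
          PySem.Str.join ", " (PySem.List.sorted (pvIds tiers t) (fun s => s)))) := by
  simp only [build_tiers_string_py]
  rw [pv_fold_eq_groups, PySem.List.foldl_append_singleton_eq_map, List.nil_append,
    pv_groups_keys]
  simp only [pv_groups_getD]
  rfl

theorem pvB_eq (tiers : List (String × Int)) :
    build_tiers_string_py_alt tiers =
      PySem.Str.join "\n" ((pvTs tiers).map (fun t =>
        PySem.Int.toStr t ++ ": " ++
          PySem.Str.join ", " (PySem.List.sorted (pvIds tiers t) (fun s => s)))) := by
  simp only [build_tiers_string_py_alt]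
  rw [pv_sorted2_eq_blocks]
  rw [pv_outer_scan (pvTs tiers) (fun t => PySem.List.sorted (pvIds tiers t) (fun s => s))
    (pv_ts_pairwise tiers)
    (fun t ht => by
      rw [ne_eq, PySem.List.sorted_eq_nil_iff]
      unfold pvTs at ht
      rw [PySem.List.mem_sorted, PySem.Set.mem_ofList] at ht
      rcases List.mem_map.mp ht with ⟨p, hp, rfl⟩
      unfold pvIds
      simp only [List.map_eq_nil_iff]
      exact List.ne_nil_of_mem (List.mem_filter.mpr ⟨hp, by simp⟩))
    [] none (fun u hu => by simp at hu)]
  rfl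

-- ===== VERDICT (by name: the statement is the Claim_ definition above) =====
theorem build_tiers_string_py_spec : Claim_equal_build_tiers_string_py := by
  intro tiers _
  unfold Spec_build_tiers_string_py
  rw [pvA_eq, pvB_eq]
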